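-- pv_equiv track=rewrite | github.com/dienthaipham103/face-recognition | tracking.py | check_in_last1
-- ===== SOURCE A (Python) =====
-- def check_in_last1(top, right, bottom, left, last_face_location):
--     li = []
--     for (face_id, person, start_x, start_y, end_x, end_y) in last_face_location:
--         if start_y <= top <= end_y:
--             if start_x <= left <= end_x:
--                 li.append((face_id, person, (end_x - left)*(end_y - top)))
--             elif start_x <= right <= end_x:
--                 li.append((face_id, person, (right - start_x)*(end_y - top)))
--             elif start_x >= left and end_x <= right:
--                 li.append((face_id, person, (end_x - start_x)*(end_y - top)))
--             elif start_x <= left and end_x >= right: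
--                 li.append((face_id, person, (right - left)*(end_y - top)))
--         elif start_y <= bottom <= end_y:
--             if start_x <= left <= end_x:
--                 li.append((face_id, person, (end_x - left)*(bottom - start_y)))
--             elif start_x <= right <= end_x:
--                 li.append((face_id, person, (right - start_x)*(bottom - start_y)))
--             elif start_x >= left and end_x <= right:
--                 li.append((face_id, person, (end_x - start_x)*(bottom - start_y)))
--             elif start_x <= left and end_x >= right:
--                 li.append((face_id, person, (right - left) * (bottom - start_y)))
--         elif start_x <= left <= end_x:
--             if start_y >= top and end_y <= bottom:
--                 li.append((face_id, person, (end_y - start_y)*(end_x - left)))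
--             elif start_y <= top and end_y >= bottom:
--                 li.append((face_id, person, (bottom - top)*(bottom - start_y)))
--         elif start_x <= right <= end_x:
--             if start_y >= top and end_y <= bottom:
--                 li.append((face_id, person, (end_y - start_y)*(right - start_x)))
--             elif start_y <= top and end_y >= bottom:
--                 li.append((face_id, person, (bottom - top)*(right - start_x)))
--     li.sort(key=lambda x: x[2])
--     if len(li) > 0:
--         return li[-1][0], li[-1][1]
--     return None
-- ===== SOURCE B (Python) =====
-- def _overlap_width(left, right, start_x, end_x):
--     if start_x <= left <= end_x:
--         return end_x - left
--     if start_x <= right <= end_x: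
--         return right - start_x
--     if start_x >= left and end_x <= right:
--         return end_x - start_x
--     if start_x <= left and end_x >= right:
--         return right - left
--     return None
--
--
-- def _overlap_area(top, right, bottom, left, start_x, start_y, end_x, end_y):
--     if start_y <= top <= end_y:
--         w = _overlap_width(left, right, start_x, end_x)
--         return None if w is None else w * (end_y - top)
--     if start_y <= bottom <= end_y:
--         w = _overlap_width(left, right, start_x, end_x)
--         return None if w is None else w * (bottom - start_y)
--     if start_x <= left <= end_x:
--         if start_y >= top and end_y <= bottom:
--             return (end_y - start_y) * (end_x - left)
--         if start_y <= top and end_y >= bottom: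
--             return (bottom - top) * (bottom - start_y)
--         return None
--     if start_x <= right <= end_x:
--         if start_y >= top and end_y <= bottom:
--             return (end_y - start_y) * (right - start_x)
--         if start_y <= top and end_y >= bottom:
--             return (bottom - top) * (right - start_x)
--         return None
--     return None
--
--
-- def check_in_last1(top, right, bottom, left, last_face_location):
--     best = None
--     for (face_id, person, start_x, start_y, end_x, end_y) in last_face_location:
--         a = _overlap_area(top, right, bottom, left, start_x, start_y, end_x, end_y)
--         if a is not None and (best is None or best[2] <= a):
--             best = (face_id, person, a)
--     return (best[0], best[1]) if best is not None else None
-- ===== Notes on version B (the rewrite author's own statement) =====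
-- stated objective: simpler
-- what changed: B replaces A's build-a-list + stable sort + take-last extraction by a single running-best scan, with the geometry branch cascade factored into an overlap-area helper returning Optional[int]; ties replace the best (>=) to match the stable ascending sort's last element.
import Mathlib
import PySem

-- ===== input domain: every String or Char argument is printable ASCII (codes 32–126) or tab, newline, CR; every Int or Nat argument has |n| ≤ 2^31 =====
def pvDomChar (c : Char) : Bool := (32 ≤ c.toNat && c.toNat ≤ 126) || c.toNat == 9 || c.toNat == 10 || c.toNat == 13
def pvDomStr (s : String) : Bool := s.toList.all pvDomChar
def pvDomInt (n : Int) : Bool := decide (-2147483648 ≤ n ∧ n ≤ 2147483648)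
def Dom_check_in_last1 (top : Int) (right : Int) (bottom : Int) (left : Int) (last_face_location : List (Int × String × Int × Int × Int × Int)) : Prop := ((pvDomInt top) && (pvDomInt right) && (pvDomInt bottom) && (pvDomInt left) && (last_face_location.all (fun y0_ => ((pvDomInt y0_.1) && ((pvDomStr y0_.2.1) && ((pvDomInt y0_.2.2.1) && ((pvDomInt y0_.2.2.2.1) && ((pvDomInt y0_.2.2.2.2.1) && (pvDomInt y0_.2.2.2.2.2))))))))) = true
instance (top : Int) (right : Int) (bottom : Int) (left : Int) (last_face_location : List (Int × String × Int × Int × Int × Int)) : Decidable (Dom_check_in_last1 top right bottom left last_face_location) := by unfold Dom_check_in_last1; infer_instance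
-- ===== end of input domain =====

-- B replaces A's build-list + stable sort + take-last by a single running-best scan (same geometry, factored into a helper); return values proved equal on all inputs.

-- ===== PORT A =====
-- loop body of A: conditionally append (face_id, person, area) to the accumulator
def aBody (top right bottom left : Int) (acc : List (Int × String × Int))
    (f : Int × String × Int × Int × Int × Int) : List (Int × String × Int) :=
  match f with
  | (face_id, person, start_x, start_y, end_x, end_y) =>
    if start_y ≤ top ∧ top ≤ end_y then
      if start_x ≤ left ∧ left ≤ end_x then acc ++ [(face_id, person, (end_x - left) * (end_y - top))]
      else if start_x ≤ right ∧ right ≤ end_x then acc ++ [(face_id, person, (right - start_x) * (end_y - top))]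
      else if start_x ≥ left ∧ end_x ≤ right then acc ++ [(face_id, person, (end_x - start_x) * (end_y - top))]
      else if start_x ≤ left ∧ end_x ≥ right then acc ++ [(face_id, person, (right - left) * (end_y - top))]
      else acc
    else if start_y ≤ bottom ∧ bottom ≤ end_y then
      if start_x ≤ left ∧ left ≤ end_x then acc ++ [(face_id, person, (end_x - left) * (bottom - start_y))]
      else if start_x ≤ right ∧ right ≤ end_x then acc ++ [(face_id, person, (right - start_x) * (bottom - start_y))]
      else if start_x ≥ left ∧ end_x ≤ right then acc ++ [(face_id, person, (end_x - start_x) * (bottom - start_y))]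
      else if start_x ≤ left ∧ end_x ≥ right then acc ++ [(face_id, person, (right - left) * (bottom - start_y))]
      else acc
    else if start_x ≤ left ∧ left ≤ end_x then
      if start_y ≥ top ∧ end_y ≤ bottom then acc ++ [(face_id, person, (end_y - start_y) * (end_x - left))]
      else if start_y ≤ top ∧ end_y ≥ bottom then acc ++ [(face_id, person, (bottom - top) * (bottom - start_y))]
      else acc
    else if start_x ≤ right ∧ right ≤ end_x then
      if start_y ≥ top ∧ end_y ≤ bottom then acc ++ [(face_id, person, (end_y - start_y) * (right - start_x))]
      else if start_y ≤ top ∧ end_y ≥ bottom then acc ++ [(face_id, person, (bottom - top) * (right - start_x))]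
      else acc
    else acc

def check_in_last1 (top : Int) (right : Int) (bottom : Int) (left : Int) (last_face_location : List (Int × String × Int × Int × Int × Int)) : Option (Int × String) :=
  let li := last_face_location.foldl (aBody top right bottom left) []
  let li := PySem.List.sorted li (fun x => x.2.2)
  if li.length > 0 then
    match PySem.List.pyGet? li (-1) with
    | some x => some (x.1, x.2.1)
    | none => none
  else none

-- ===== PORT B =====
def overlapWidth (left right start_x end_x : Int) : Option Int :=
  if start_x ≤ left ∧ left ≤ end_x then some (end_x - left)
  else if start_x ≤ right ∧ right ≤ end_x then some (right - start_x)
  else if start_x ≥ left ∧ end_x ≤ right then some (end_x - start_x)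
  else if start_x ≤ left ∧ end_x ≥ right then some (right - left)
  else none

def overlapArea (top right bottom left start_x start_y end_x end_y : Int) : Option Int :=
  if start_y ≤ top ∧ top ≤ end_y then
    match overlapWidth left right start_x end_x with
    | none => none
    | some w => some (w * (end_y - top))
  else if start_y ≤ bottom ∧ bottom ≤ end_y then
    match overlapWidth left right start_x end_x with
    | none => none
    | some w => some (w * (bottom - start_y))
  else if start_x ≤ left ∧ left ≤ end_x then
    if start_y ≥ top ∧ end_y ≤ bottom then some ((end_y - start_y) * (end_x - left))
    else if start_y ≤ top ∧ end_y ≥ bottom then some ((bottom - top) * (bottom - start_y))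
    else none
  else if start_x ≤ right ∧ right ≤ end_x then
    if start_y ≥ top ∧ end_y ≤ bottom then some ((end_y - start_y) * (right - start_x))
    else if start_y ≤ top ∧ end_y ≥ bottom then some ((bottom - top) * (right - start_x))
    else none
  else none

def bStep (top right bottom left : Int) (best : Option (Int × String × Int))
    (f : Int × String × Int × Int × Int × Int) : Option (Int × String × Int) :=
  match f with
  | (face_id, person, start_x, start_y, end_x, end_y) =>
    match overlapArea top right bottom left start_x start_y end_x end_y with
    | none => best
    | some a =>
      match best with
      | none => some (face_id, person, a)
      | some b => if b.2.2 ≤ a then some (face_id, person, a) else some b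

def check_in_last1_alt (top : Int) (right : Int) (bottom : Int) (left : Int) (last_face_location : List (Int × String × Int × Int × Int × Int)) : Option (Int × String) :=
  match last_face_location.foldl (bStep top right bottom left) none with
  | some b => some (b.1, b.2.1)
  | none => none

-- ===== PRECONDITION & SPEC =====
def Spec_check_in_last1 (top : Int) (right : Int) (bottom : Int) (left : Int) (last_face_location : List (Int × String × Int × Int × Int × Int)) (out : Option (Int × String)) : Prop := out = check_in_last1_alt top right bottom left last_face_location
instance (top : Int) (right : Int) (bottom : Int) (left : Int) (last_face_location : List (Int × String × Int × Int × Int × Int)) (out : Option (Int × String)) : Decidable (Spec_check_in_last1 top right bottom left last_face_location out) := by unfold Spec_check_in_last1; infer_instance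

-- ===== CLAIM (what is proved, stated in full; the proofs are below) =====
def Claim_equal_check_in_last1 : Prop := ∀ (top : Int) (right : Int) (bottom : Int) (left : Int) (last_face_location : List (Int × String × Int × Int × Int × Int)), Dom_check_in_last1 top right bottom left last_face_location → Spec_check_in_last1 top right bottom left last_face_location (check_in_last1 top right bottom left last_face_location)

-- ===== LEMMAS AND PROOFS =====

-- the candidate A appends for one face, as an optional element
def cand (top right bottom left : Int) (f : Int × String × Int × Int × Int × Int) : List (Int × String × Int) :=
  match overlapArea top right bottom left f.2.2.1 f.2.2.2.1 f.2.2.2.2.1 f.2.2.2.2.2 with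
  | none => []
  | some a => [(f.1, f.2.1, a)]

theorem aBody_eq_cand (top right bottom left : Int) (acc : List (Int × String × Int))
    (f : Int × String × Int × Int × Int × Int) :
    aBody top right bottom left acc f = acc ++ cand top right bottom left f := by
  obtain ⟨i, p, sx, sy, ex, ey⟩ := f
  simp only [aBody, cand, overlapArea, overlapWidth]
  split_ifs <;> simp

-- abbreviation for the running-best step over candidates
def optStep (b : Option (Int × String × Int)) (c : Int × String × Int) : Option (Int × String × Int) :=
  match b with
  | none => some c
  | some p => if p.2.2 ≤ c.2.2 then some c else some p

theorem bStep_eq_fold (top right bottom left : Int) (best : Option (Int × String × Int))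
    (f : Int × String × Int × Int × Int × Int) :
    bStep top right bottom left best f =
      (cand top right bottom left f).foldl optStep best := by
  obtain ⟨i, p, sx, sy, ex, ey⟩ := f
  simp only [bStep, cand]
  cases overlapArea top right bottom left sx sy ex ey with
  | none => rfl
  | some a => cases best <;> simp [optStep]

theorem getLast?_cons_ne {α : Type} (a : α) (l : List α) (h : l ≠ []) :
    (a :: l).getLast? = l.getLast? := by
  cases l with
  | nil => exact absurd rfl h
  | cons b t => rw [List.getLast?_cons_cons]

theorem insertBy_pairwise (key : (Int × String × Int) → Int) (x : Int × String × Int)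
    (ys : List (Int × String × Int)) (h : ys.Pairwise (fun a b => key a ≤ key b)) :
    (PySem.List.insertBy (fun a b => decide (key a < key b)) x ys).Pairwise
      (fun a b => key a ≤ key b) := by
  induction ys with
  | nil => simp [PySem.List.insertBy]
  | cons y ys ih =>
    rw [List.pairwise_cons] at h
    by_cases hlt : key x < key y
    · have : PySem.List.insertBy (fun a b => decide (key a < key b)) x (y :: ys)
          = x :: y :: ys := by simp [PySem.List.insertBy, hlt]
      rw [this]
      refine List.Pairwise.cons ?_ (List.Pairwise.cons h.1 h.2)
      intro z hz
      rcases List.mem_cons.mp hz with rfl | hz'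
      · exact le_of_lt hlt
      · exact le_trans (le_of_lt hlt) (h.1 z hz')
    · have : PySem.List.insertBy (fun a b => decide (key a < key b)) x (y :: ys)
          = y :: PySem.List.insertBy (fun a b => decide (key a < key b)) x ys := by
        simp [PySem.List.insertBy, hlt]
      rw [this]
      refine List.Pairwise.cons ?_ (ih h.2)
      intro z hz
      rcases (PySem.List.mem_insertBy _ _ _ _).mp hz with rfl | hz'
      · exact le_of_not_gt hlt
      · exact h.1 z hz'

theorem insertBy_ne_nil (key : (Int × String × Int) → Int) (x : Int × String × Int)
    (ys : List (Int × String × Int)) :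
    PySem.List.insertBy (fun a b => decide (key a < key b)) x ys ≠ [] := by
  cases ys with
  | nil => simp [PySem.List.insertBy]
  | cons y ys =>
    by_cases hlt : key x < key y <;> simp [PySem.List.insertBy, hlt]

theorem getLast?_insertBy (key : (Int × String × Int) → Int) (x : Int × String × Int)
    (ys : List (Int × String × Int)) (h : ys.Pairwise (fun a b => key a ≤ key b)) :
    (PySem.List.insertBy (fun a b => decide (key a < key b)) x ys).getLast? =
      match ys.getLast? with
      | none => some x
      | some l => if key l ≤ key x then some x else some l := by
  induction ys with
  | nil => simp [PySem.List.insertBy]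
  | cons y ys ih =>
    rw [List.pairwise_cons] at h
    by_cases hlt : key x < key y
    · have he : PySem.List.insertBy (fun a b => decide (key a < key b)) x (y :: ys)
          = x :: y :: ys := by simp [PySem.List.insertBy, hlt]
      rw [he]
      cases hy : ys.getLast? with
      | none =>
        have : ys = [] := List.getLast?_eq_none_iff.mp hy
        subst this
        simp [List.getLast?, not_le.mpr hlt]
      | some l =>
        have hl : l ∈ ys := List.mem_of_getLast? hy
        have hyl : key y ≤ key l := h.1 l hl
        have hns : ys ≠ [] := by rintro rfl; simp at hy
        have h1 : (y :: ys).getLast? = some l := by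
          rw [getLast?_cons_ne _ _ hns]; exact hy
        have h2 : (x :: y :: ys).getLast? = some l := by
          rw [getLast?_cons_ne _ _ (by simp)]; exact h1
        rw [h1, h2]
        have : ¬ key l ≤ key x := not_le.mpr (lt_of_lt_of_le hlt hyl)
        simp [this]
    · have he : PySem.List.insertBy (fun a b => decide (key a < key b)) x (y :: ys)
          = y :: PySem.List.insertBy (fun a b => decide (key a < key b)) x ys := by
        simp [PySem.List.insertBy, hlt]
      rw [he]
      rw [getLast?_cons_ne _ _ (insertBy_ne_nil key x ys)]
      rw [ih h.2]
      cases hy : ys.getLast? with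
      | none =>
        have : ys = [] := List.getLast?_eq_none_iff.mp hy
        subst this
        simp [List.getLast?, le_of_not_gt hlt]
      | some l =>
        have hns : ys ≠ [] := by rintro rfl; simp at hy
        rw [getLast?_cons_ne _ _ hns, hy]

theorem foldl_insertBy_getLast? (key : (Int × String × Int) → Int)
    (L : List (Int × String × Int)) :
    ∀ (acc : List (Int × String × Int)), acc.Pairwise (fun a b => key a ≤ key b) →
      (L.foldl (fun acc x => PySem.List.insertBy (fun a b => decide (key a < key b)) x acc) acc).getLast? =
        L.foldl (fun b c => match b with
          | none => some c
          | some p => if key p ≤ key c then some c else some p) acc.getLast? := by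
  induction L with
  | nil => intro acc _; rfl
  | cons x L ih =>
    intro acc hacc
    simp only [List.foldl_cons]
    rw [ih _ (insertBy_pairwise key x acc hacc), getLast?_insertBy key x acc hacc]

theorem foldl_aBody (top right bottom left : Int)
    (L : List (Int × String × Int × Int × Int × Int)) :
    ∀ (acc : List (Int × String × Int)),
      L.foldl (aBody top right bottom left) acc = acc ++ L.flatMap (cand top right bottom left) := by
  induction L with
  | nil => intro acc; simp
  | cons x L ih =>
    intro acc
    simp only [List.foldl_cons, List.flatMap_cons]
    rw [ih, aBody_eq_cand, List.append_assoc]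

theorem foldl_optStep_flatMap (top right bottom left : Int)
    (L : List (Int × String × Int × Int × Int × Int)) :
    ∀ (b : Option (Int × String × Int)),
      L.foldl (bStep top right bottom left) b =
        (L.flatMap (cand top right bottom left)).foldl optStep b := by
  induction L with
  | nil => intro b; rfl
  | cons x L ih =>
    intro b
    simp only [List.foldl_cons, List.flatMap_cons, List.foldl_append]
    rw [bStep_eq_fold, ih]

theorem pyGet?_neg_one (xs : List (Int × String × Int)) (h : xs ≠ []) :
    PySem.List.pyGet? xs (-1) = xs.getLast? := by
  have hlen : 0 < xs.length := List.length_pos_iff.mpr h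
  have hidx : PySem.List.pyIdx? xs.length (-1) = some (xs.length - 1) := by
    simp only [PySem.List.pyIdx?]
    rw [if_neg (by norm_num), if_pos (by omega)]
    norm_num
  simp [PySem.List.pyGet?, hidx, List.getLast?_eq_getElem?]

theorem sorted_getLast? (li : List (Int × String × Int)) :
    (PySem.List.sorted li (fun x => x.2.2)).getLast? = li.foldl optStep none := by
  rw [PySem.List.sorted_eq_foldl_insertBy]
  rw [foldl_insertBy_getLast? (fun x => x.2.2) li [] List.Pairwise.nil]
  rfl

-- ===== VERDICT (by name: the statement is the Claim_ definition above) =====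
theorem check_in_last1_spec : Claim_equal_check_in_last1 := by
  intro top right bottom left lfl _
  unfold Spec_check_in_last1
  show check_in_last1 top right bottom left lfl = check_in_last1_alt top right bottom left lfl
  simp only [check_in_last1, check_in_last1_alt]
  rw [foldl_aBody, List.nil_append, foldl_optStep_flatMap]
  set li := lfl.flatMap (cand top right bottom left) with hli
  rw [← sorted_getLast?]
  cases h : (PySem.List.sorted li (fun x => x.2.2)).getLast? with
  | none =>
    have hnil : PySem.List.sorted li (fun x => x.2.2) = [] := List.getLast?_eq_none_iff.mp h
    simp [hnil]
  | some x =>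
    have hne : PySem.List.sorted li (fun x => x.2.2) ≠ [] := by
      intro hc; rw [hc] at h; simp at h
    have hlen : 0 < (PySem.List.sorted li (fun x => x.2.2)).length := List.length_pos_iff.mpr hne
    rw [if_pos hlen, pyGet?_neg_one _ hne, h]
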